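-- pv_equiv track=rewrite | github.com/Alex-Teteria/The-hodgepodge-for-WS2812B-RGB-LED-panel | Maze/maze.py | find_path_back
-- ===== SOURCE A (Python) =====
-- def find_path_back(G, tour, t):
--     prev, vertex = t
--     path = []
--     v = vertex
--     while v not in G[prev]:
--         path.append((v, tour[v]))
--         v = tour[v]
--     path.append((v, prev))
--     return path
-- ===== SOURCE B (Python) =====
-- def find_path_back(G, tour, t):
--     # Recursive decomposition: head pair prepended to the recursively built tail,
--     # with the target adjacency frozen into a set once.
--     prev, vertex = t
--     return _chase(set(G[prev]), tour, prev, vertex)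
--
-- def _chase(adj, tour, prev, v):
--     if v in adj:
--         return [(v, prev)]
--     nxt = tour[v]
--     return [(v, nxt)] + _chase(adj, tour, prev, nxt)
-- ===== Notes on version B (the rewrite author's own statement) =====
-- stated objective: alternative
-- what changed: Replaces A's imperative while-loop that mutates an accumulator list and a cursor variable with a recursive decomposition: a helper freezes G[prev] into a set and builds the path by consing the head pair onto the recursively constructed tail, with the base case returning [(v, prev)].
import Mathlib
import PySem

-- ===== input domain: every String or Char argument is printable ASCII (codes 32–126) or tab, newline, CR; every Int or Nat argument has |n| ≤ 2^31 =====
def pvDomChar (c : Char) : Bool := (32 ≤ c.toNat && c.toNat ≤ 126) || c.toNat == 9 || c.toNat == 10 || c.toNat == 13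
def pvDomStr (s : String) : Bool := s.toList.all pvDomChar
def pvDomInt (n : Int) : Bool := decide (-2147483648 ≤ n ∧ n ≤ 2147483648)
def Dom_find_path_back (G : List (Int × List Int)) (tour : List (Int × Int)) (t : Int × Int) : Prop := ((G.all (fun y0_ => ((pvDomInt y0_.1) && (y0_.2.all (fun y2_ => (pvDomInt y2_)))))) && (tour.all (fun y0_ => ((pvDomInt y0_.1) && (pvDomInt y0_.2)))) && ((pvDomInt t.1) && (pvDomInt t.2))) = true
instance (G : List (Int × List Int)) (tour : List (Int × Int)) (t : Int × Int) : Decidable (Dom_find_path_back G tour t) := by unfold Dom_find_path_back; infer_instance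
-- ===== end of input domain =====

-- B replaces A's imperative append-loop over a mutable accumulator with a recursive
-- decomposition (head pair consed onto the recursively built tail) over a frozen
-- adjacency set. Same cost; objective: alternative.

-- ===== PORT A =====
-- dict lookup (first match in the association list), total via Option
def pvAssocGet {α : Type} (d : List (Int × α)) (k : Int) : Option α :=
  match d with
  | [] => none
  | (a, b) :: rest => if a = k then some b else pvAssocGet rest k

-- the while loop of A: while v not in G[prev]: path.append((v, tour[v])); v = tour[v]
-- fuel bounds the walk; Pre_ guarantees the chain terminates within tour.length + 1 steps
def pvLoopA (adj : List Int) (tour : List (Int × Int)) (prev : Int) :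
    Nat → Int → List (Int × Int) → List (Int × Int)
  | 0, _, path => path
  | fuel + 1, v, path =>
    if adj.contains v then path ++ [(v, prev)]
    else
      let tv := (pvAssocGet tour v).getD 0
      pvLoopA adj tour prev fuel tv (path ++ [(v, tv)])

def find_path_back (G : List (Int × List Int)) (tour : List (Int × Int)) (t : Int × Int) : List (Int × Int) :=
  let prev := t.1
  let vertex := t.2
  let adj := (pvAssocGet G prev).getD []
  pvLoopA adj tour prev (tour.length + 1) vertex []

-- ===== PORT B =====
-- _chase(adj, tour, prev, v): if v in adj: return [(v, prev)]; else prepend (v, tour[v])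
-- to the recursive result; fuel bounds the recursion (Pre_ guarantees termination inside it)
def pvChase (adj : PySem.Set Int) (tour : List (Int × Int)) (prev : Int) :
    Nat → Int → List (Int × Int)
  | 0, _ => []
  | fuel + 1, v =>
    if PySem.Set.contains adj v then [(v, prev)]
    else
      let nxt := (tour.lookup v).getD 0
      (v, nxt) :: pvChase adj tour prev fuel nxt

def find_path_back_alt (G : List (Int × List Int)) (tour : List (Int × Int)) (t : Int × Int) : List (Int × Int) :=
  let prev := t.1
  let vertex := t.2
  pvChase (PySem.Set.ofList ((G.lookup prev).getD [])) tour prev (tour.length + 1) vertex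

-- ===== PRECONDITION & SPEC =====
-- the successor map of the tour dict, propagating "missing key" as none
def pvStep (tour : List (Int × Int)) : Option Int → Option Int
  | none => none
  | some v => tour.lookup v

-- Pre_: A raises KeyError when prev is missing from G or some tour[v] lookup on the walk is
-- missing, and loops forever when the chain never meets G[prev]; Pre_ admits exactly the
-- inputs where the walk terminates normally: prev is a key of G and some iterate (at most
-- tour.length applications, which suffices since a terminating walk visits distinct keys of
-- tour) of the tour successor map sends vertex into G[prev] without hitting a missing key.
def Pre_find_path_back (G : List (Int × List Int)) (tour : List (Int × Int)) (t : Int × Int) : Prop :=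
  (G.lookup t.1).isSome ∧
  ∃ n ≤ tour.length,
    (((pvStep tour)^[n] (some t.2)).any fun w => ((G.lookup t.1).getD []).contains w) = true
instance (G : List (Int × List Int)) (tour : List (Int × Int)) (t : Int × Int) : Decidable (Pre_find_path_back G tour t) := by unfold Pre_find_path_back; infer_instance

def pvWitness_find_path_back : (List (Int × List Int)) × (List (Int × Int)) × (Int × Int) :=
  ([(0, [3]), (1, [5])], [(2, 4), (4, 6), (6, 3), (3, 9)], (0, 2))

def Spec_find_path_back (G : List (Int × List Int)) (tour : List (Int × Int)) (t : Int × Int) (out : List (Int × Int)) : Prop := out = find_path_back_alt G tour t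
instance (G : List (Int × List Int)) (tour : List (Int × Int)) (t : Int × Int) (out : List (Int × Int)) : Decidable (Spec_find_path_back G tour t out) := by unfold Spec_find_path_back; infer_instance

-- ===== CLAIM (what is proved, stated in full; the proofs are below) =====
def Claim_equal_find_path_back : Prop := ∀ (G : List (Int × List Int)) (tour : List (Int × Int)) (t : Int × Int), Dom_find_path_back G tour t → Pre_find_path_back G tour t → Spec_find_path_back G tour t (find_path_back G tour t)

-- ===== LEMMAS AND PROOFS =====

-- the hand-rolled first-match lookup of port A agrees with the library List.lookup
lemma pvAssocGet_eq_lookup {α : Type} (d : List (Int × α)) (k : Int) :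
    pvAssocGet d k = d.lookup k := by
  induction d with
  | nil => rfl
  | cons p rest ih =>
    cases p with
    | mk a b =>
      by_cases hak : a = k
      · simp [pvAssocGet, List.lookup, hak]
      · have hka : (k == a) = false := beq_eq_false_iff_ne.mpr (fun h => hak h.symm)
        simp [pvAssocGet, List.lookup, hak, ih, hka]

-- membership in set(adj) is membership in adj
lemma pvContains_ofList (adj : List Int) (v : Int) :
    PySem.Set.contains (PySem.Set.ofList adj) v = adj.contains v := by
  by_cases h : v ∈ adj
  · simp [PySem.Set.contains_iff, PySem.Set.mem_ofList, h]
  · simp [PySem.Set.contains_iff, PySem.Set.mem_ofList, h]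

-- proof-side fuel form of the walk's termination
def pvReaches (adj : List Int) (tour : List (Int × Int)) : Nat → Int → Bool
  | 0, _ => false
  | fuel + 1, v =>
    adj.contains v ||
      (match tour.lookup v with
       | none => false
       | some tv => pvReaches adj tour fuel tv)

lemma pvStep_iterate_none (tour : List (Int × Int)) : ∀ m : Nat, (pvStep tour)^[m] none = none := by
  intro m
  induction m with
  | zero => rfl
  | succ k ihk => rw [Function.iterate_succ_apply, pvStep]; exact ihk

lemma pvReaches_of_iter (adj : List Int) (tour : List (Int × Int)) :
    ∀ (n fuel : Nat) (v : Int), n < fuel →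
      (((pvStep tour)^[n] (some v)).any fun w => adj.contains w) = true →
      pvReaches adj tour fuel v = true := by
  intro n
  induction n with
  | zero =>
    intro fuel v hlt h
    cases fuel with
    | zero => omega
    | succ f =>
      simp only [Function.iterate_zero, id_eq, Option.any_some] at h
      simp only [pvReaches, Bool.or_eq_true]
      exact Or.inl h
  | succ m ih =>
    intro fuel v hlt h
    cases fuel with
    | zero => omega
    | succ f =>
      rw [Function.iterate_succ_apply] at h
      cases htv : pvStep tour (some v) with
      | none =>
        rw [htv] at h
        rw [pvStep_iterate_none tour m] at h
        simp at h
      | some tv =>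
        rw [htv] at h
        have := ih f tv (by omega) h
        simp only [pvStep] at htv
        simp [pvReaches, htv, this]

-- A's accumulator loop appends exactly B's recursively built chain
lemma pvLoop_eq_chase (adj : List Int) (tour : List (Int × Int)) (prev : Int) :
    ∀ (fuel : Nat) (v : Int) (path : List (Int × Int)),
      pvReaches adj tour fuel v = true →
      pvLoopA adj tour prev fuel v path =
        path ++ pvChase (PySem.Set.ofList adj) tour prev fuel v := by
  intro fuel
  induction fuel with
  | zero => intro v path h; simp [pvReaches] at h
  | succ f ih =>
    intro v path h
    by_cases hv : v ∈ adj
    · simp [pvLoopA, pvChase, hv]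
    · have hm : adj.contains v = false := by simpa using hv
      simp only [pvReaches, hm, Bool.false_or] at h
      cases htv : tour.lookup v with
      | none => rw [htv] at h; simp at h
      | some tv =>
        rw [htv] at h
        have hih := ih tv (path ++ [(v, tv)]) h
        simp only [pvLoopA, pvChase, pvContains_ofList, hm, pvAssocGet_eq_lookup, htv,
          Option.getD_some, Bool.false_eq_true, if_false] at hih ⊢
        rw [hih]
        simp

theorem find_path_back_spec_aux (G : List (Int × List Int)) (tour : List (Int × Int)) (t : Int × Int)
    (hpre : Pre_find_path_back G tour t) :
    find_path_back G tour t = find_path_back_alt G tour t := by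
  obtain ⟨_, n, hn, hiter⟩ := hpre
  have hreach : pvReaches ((G.lookup t.1).getD []) tour (tour.length + 1) t.2 = true :=
    pvReaches_of_iter _ _ n (tour.length + 1) t.2 (by omega) hiter
  simp only [find_path_back, find_path_back_alt, pvAssocGet_eq_lookup]
  rw [pvLoop_eq_chase _ _ _ _ _ _ hreach]
  simp

-- ===== VERDICT (by name: the statement is the Claim_ definition above) =====
theorem find_path_back_spec : Claim_equal_find_path_back := by
  intro G tour t _ hpre
  exact find_path_back_spec_aux G tour t hpre
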